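-- pv_equiv track=rewrite | github.com/steinhh/crtools | generate_sort27.py | generate_odd_even_merge
-- ===== SOURCE A (Python) =====
-- def generate_odd_even_merge(lo, n, r, ascending=True):
--     """
--     Generate comparators for odd-even merge network.
--     lo: starting index
--     n: number of elements
--     r: step size
--     """
--     comparators = []
--     step = r * 2
--     if step < n:
--         # Recursively merge odd and even subsequences
--         comparators.extend(generate_odd_even_merge(lo, n, step, ascending))
--         comparators.extend(generate_odd_even_merge(lo + r, n, step, ascending))
--         # Compare-exchange between merged sequences
--         for i in range(lo + r, lo + n - r, step):
--             comparators.append((i, i + r, ascending))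
--     else:
--         comparators.append((lo, lo + r, ascending))
--     return comparators
-- ===== SOURCE B (Python) =====
-- def generate_odd_even_merge(lo, n, r, ascending=True):
--     """Odd-even merge comparators via an explicit LIFO task stack instead of recursion."""
--     comparators = []
--     stack = [("expand", lo, n, r)]
--     while stack:
--         kind, l, m, s = stack.pop()
--         if kind == "expand":
--             step = s * 2
--             if step < m:
--                 # pop order: left expand, right expand, emit-loop
--                 stack.append(("emit", l, m, s))
--                 stack.append(("expand", l + s, m, step))
--                 stack.append(("expand", l, m, step))
--             else:
--                 comparators.append((l, l + s, ascending))
--         else: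
--             for i in range(l + s, l + m - s, 2 * s):
--                 comparators.append((i, i + s, ascending))
--     return comparators
-- ===== Notes on version B (the rewrite author's own statement) =====
-- stated objective: alternative
-- what changed: Replaces A's recursive calls by an iterative loop over an explicit LIFO stack of expand/emit-loop tasks that reproduces the post-order emission.
import Mathlib
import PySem

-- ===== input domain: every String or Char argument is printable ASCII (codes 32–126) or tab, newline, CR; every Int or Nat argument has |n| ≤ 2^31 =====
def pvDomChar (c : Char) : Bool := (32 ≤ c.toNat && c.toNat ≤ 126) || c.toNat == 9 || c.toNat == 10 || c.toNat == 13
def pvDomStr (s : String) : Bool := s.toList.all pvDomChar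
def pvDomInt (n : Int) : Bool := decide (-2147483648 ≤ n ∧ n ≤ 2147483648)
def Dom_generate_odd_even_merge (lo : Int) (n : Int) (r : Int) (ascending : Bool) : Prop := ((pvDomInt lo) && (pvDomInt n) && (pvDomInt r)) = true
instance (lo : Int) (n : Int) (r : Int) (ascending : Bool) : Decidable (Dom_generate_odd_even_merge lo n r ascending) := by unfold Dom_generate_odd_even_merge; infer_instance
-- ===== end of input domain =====

-- B replaces A's recursion by an explicit LIFO task-stack loop (same return value; no speed claim).

-- ===== PORT A =====
-- Literal port of A's recursion. Python recurses only when r*2 < n; the extra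
-- '0 < r' conjunct only makes the Lean recursion total (on 2*r < n ∧ r ≤ 0 the
-- Python recurses forever — those inputs are excluded by Pre_ below).
def generate_odd_even_merge (lo : Int) (n : Int) (r : Int) (ascending : Bool) : List (Int × Int × Bool) :=
  if _h : r * 2 < n ∧ 0 < r then
    generate_odd_even_merge lo n (r * 2) ascending
      ++ generate_odd_even_merge (lo + r) n (r * 2) ascending
      ++ (PySem.List.pyRange (lo + r) (lo + n - r) (r * 2)).map (fun i => (i, i + r, ascending))
  else
    [(lo, lo + r, ascending)]
termination_by (n - r).toNat
decreasing_by
  · omega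
  · omega

-- ===== PORT B =====
inductive OEMTask where
  | expand : Int → Int → Int → OEMTask
  | emit : Int → Int → Int → OEMTask
deriving DecidableEq, Repr

def oemWeight : OEMTask → Nat
  | .emit _ _ _ => 1
  | .expand _ n r => 4 ^ (n - r).toNat + 1

-- the while-stack loop of Source B ('0 < r' again only for totality, as in port A)
def oemLoop (ascending : Bool) (stack : List OEMTask) (acc : List (Int × Int × Bool)) :
    List (Int × Int × Bool) :=
  match stack with
  | [] => acc
  | .expand l m s :: rest =>
    if _h : s * 2 < m ∧ 0 < s then
      oemLoop ascending (.expand l m (s * 2) :: .expand (l + s) m (s * 2) :: .emit l m s :: rest) acc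
    else
      oemLoop ascending rest (acc ++ [(l, l + s, ascending)])
  | .emit l m s :: rest =>
    oemLoop ascending rest
      (acc ++ (PySem.List.pyRange (l + s) (l + m - s) (2 * s)).map (fun i => (i, i + s, ascending)))
termination_by (stack.map oemWeight).sum
decreasing_by
  · simp only [List.map_cons, List.sum_cons, oemWeight]
    have hd : (m - s * 2).toNat + 1 ≤ (m - s).toNat := by omega
    have hd2 : 2 ≤ (m - s).toNat := by omega
    have h1 : 4 ^ ((m - s * 2).toNat + 1) ≤ 4 ^ (m - s).toNat :=
      Nat.pow_le_pow_right (by norm_num) hd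
    have h3 : (16:ℕ) ≤ 4 ^ (m - s).toNat := by
      calc (16:ℕ) = 4 ^ 2 := by norm_num
      _ ≤ 4 ^ (m - s).toNat := Nat.pow_le_pow_right (by norm_num) hd2
    omega
  · simp only [List.map_cons, List.sum_cons, oemWeight]
    have h2 : (1:ℕ) ≤ 4 ^ (m - s).toNat := Nat.one_le_pow _ _ (by norm_num)
    omega
  · simp only [List.map_cons, List.sum_cons, oemWeight]
    omega

def generate_odd_even_merge_alt (lo : Int) (n : Int) (r : Int) (ascending : Bool) :
    List (Int × Int × Bool) :=
  oemLoop ascending [.expand lo n r] []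

-- ===== PRECONDITION & SPEC =====
-- Pre_ excludes exactly the inputs where Python A never returns (RecursionError:
-- r ≤ 0 while 2*r < n keeps the recursion guard true forever).
def Pre_generate_odd_even_merge (lo : Int) (n : Int) (r : Int) (ascending : Bool) : Prop :=
  0 < r ∨ n ≤ 2 * r
instance (lo : Int) (n : Int) (r : Int) (ascending : Bool) : Decidable (Pre_generate_odd_even_merge lo n r ascending) := by unfold Pre_generate_odd_even_merge; infer_instance

def pvWitness_generate_odd_even_merge : Int × Int × Int × Bool := (0, 8, 1, true)

def Spec_generate_odd_even_merge (lo : Int) (n : Int) (r : Int) (ascending : Bool) (out : List (Int × Int × Bool)) : Prop := out = generate_odd_even_merge_alt lo n r ascending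
instance (lo : Int) (n : Int) (r : Int) (ascending : Bool) (out : List (Int × Int × Bool)) : Decidable (Spec_generate_odd_even_merge lo n r ascending out) := by unfold Spec_generate_odd_even_merge; infer_instance

-- ===== CLAIM (what is proved, stated in full; the proofs are below) =====
def Claim_equal_generate_odd_even_merge : Prop := ∀ (lo : Int) (n : Int) (r : Int) (ascending : Bool), Dom_generate_odd_even_merge lo n r ascending → Pre_generate_odd_even_merge lo n r ascending → Spec_generate_odd_even_merge lo n r ascending (generate_odd_even_merge lo n r ascending)

-- ===== LEMMAS AND PROOFS =====

-- Processing an 'expand' task appends exactly A's recursive result to the accumulator.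
theorem oemLoop_expand (lo n r : Int) (ascending : Bool) :
    ∀ (rest : List OEMTask) (acc : List (Int × Int × Bool)),
      oemLoop ascending (.expand lo n r :: rest) acc
        = oemLoop ascending rest (acc ++ generate_odd_even_merge lo n r ascending) := by
  induction lo, r using generate_odd_even_merge.induct (n := n) with
  | case1 lo r h ih1 ih2 =>
    intro rest acc
    have hA : generate_odd_even_merge lo n r ascending
        = generate_odd_even_merge lo n (r * 2) ascending
          ++ generate_odd_even_merge (lo + r) n (r * 2) ascending
          ++ (PySem.List.pyRange (lo + r) (lo + n - r) (r * 2)).map (fun i => (i, i + r, ascending)) := by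
      rw [generate_odd_even_merge, dif_pos h]
    rw [oemLoop, dif_pos h, ih1, ih2, oemLoop, hA,
      show (2 : ℤ) * r = r * 2 by ring]
    simp [List.append_assoc]
  | case2 lo r h =>
    intro rest acc
    rw [oemLoop, dif_neg h, generate_odd_even_merge, dif_neg h]

-- ===== VERDICT (by name: the statement is the Claim_ definition above) =====
theorem generate_odd_even_merge_spec : Claim_equal_generate_odd_even_merge := by
  intro lo n r ascending _ _
  unfold Spec_generate_odd_even_merge generate_odd_even_merge_alt
  rw [oemLoop_expand, oemLoop]
  simp
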